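-- pv_equiv track=rewrite | github.com/JanKesek/python-algorithm-automata-libraries | rosalind/algorithms/deg.py | calculateGraphDoubleDegrees
-- ===== SOURCE A (Python) =====
-- def calculateGraphDoubleDegrees(edgeList,n):
--     graph ={}
--     for e in edgeList:
--         if e[0] not in graph:
--             graph[e[0]] = set()
--         if e[1] not in graph:
--             graph[e[1]] = set()
--         graph[e[0]].add(e[1])
--         graph[e[1]].add(e[0])
--     output = ""
--     for i in range(1,n+1):
--         counter = 0
--         if i in graph:
--             neighbours = list(graph[i])
--             for n in neighbours:
--                 counter += len(graph[n])
--         output += str(counter) + " "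
--     return output
-- ===== SOURCE B (Python) =====
-- def calculateGraphDoubleDegrees(edgeList, n):
--     # Build the same deduped undirected adjacency sets as A.
--     graph = {}
--     for e in edgeList:
--         if e[0] not in graph:
--             graph[e[0]] = set()
--         if e[1] not in graph:
--             graph[e[1]] = set()
--         graph[e[0]].add(e[1])
--         graph[e[1]].add(e[0])
--     # Degree table, then one edge-centric pass over the distinct undirected
--     # edges (taken as pairs u <= v) accumulating both endpoints' double degrees.
--     deg = {u: len(s) for u, s in graph.items()}
--     ddeg = {}
--     for u, nbrs in graph.items():
--         for v in nbrs:
--             if u < v: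
--                 ddeg[u] = ddeg.get(u, 0) + deg[v]
--                 ddeg[v] = ddeg.get(v, 0) + deg[u]
--             elif u == v:
--                 ddeg[u] = ddeg.get(u, 0) + deg[u]
--     return "".join(str(ddeg.get(i, 0)) + " " for i in range(1, n + 1))
-- ===== Notes on version B (the rewrite author's own statement) =====
-- stated objective: alternative
-- what changed: A recomputes each vertex's answer by scanning its neighbour set and taking len(graph[v]) inside a per-vertex loop over 1..n; B precomputes a degree table and fills a double-degree dictionary in a single edge-centric pass over the distinct undirected edges (pairs u<v, self-loops counted once), then only reads it when building the output string.
import Mathlib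
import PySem

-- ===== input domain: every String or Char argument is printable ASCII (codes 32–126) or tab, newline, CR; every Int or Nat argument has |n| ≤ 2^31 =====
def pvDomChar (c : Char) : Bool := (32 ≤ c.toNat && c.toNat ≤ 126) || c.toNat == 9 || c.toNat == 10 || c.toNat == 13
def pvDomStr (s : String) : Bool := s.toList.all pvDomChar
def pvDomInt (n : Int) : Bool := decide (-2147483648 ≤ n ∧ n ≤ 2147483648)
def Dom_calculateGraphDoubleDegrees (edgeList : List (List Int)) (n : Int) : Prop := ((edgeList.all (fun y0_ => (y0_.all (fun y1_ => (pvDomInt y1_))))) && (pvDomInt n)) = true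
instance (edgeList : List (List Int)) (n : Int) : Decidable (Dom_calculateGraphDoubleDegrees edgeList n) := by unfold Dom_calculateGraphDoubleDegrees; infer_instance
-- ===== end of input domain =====

-- B replaces A's per-vertex neighbour scan (len(graph[v]) re-read for every output index) by a
-- precomputed degree table plus a single edge-centric pass over the distinct undirected edges
-- (pairs u < v, self-loops once) filling a double-degree dictionary; objective: alternative.

-- ===== PORT A =====
-- shared by both ports: the adjacency-building loop (the first loop of Source A and of Source B, identical text)
def pvAddEdge (g : PySem.Dict Int (PySem.Set Int)) (e : List Int) : PySem.Dict Int (PySem.Set Int) :=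
  match e with
  | a :: b :: _ =>
    let g1 := if g.contains a then g else g.insert a PySem.Set.empty
    let g2 := if g1.contains b then g1 else g1.insert b PySem.Set.empty
    let g3 := g2.modify a PySem.Set.empty (fun s => PySem.Set.add s b)
    g3.modify b PySem.Set.empty (fun s => PySem.Set.add s a)
  | _ => g  -- e[0] raises IndexError in Python; excluded by Pre_

def pvBuildGraph (edgeList : List (List Int)) : PySem.Dict Int (PySem.Set Int) :=
  edgeList.foldl pvAddEdge PySem.Dict.empty

def calculateGraphDoubleDegrees (edgeList : List (List Int)) (n : Int) : String :=
  let graph := pvBuildGraph edgeList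
  (PySem.List.pyRange 1 (n + 1) 1).foldl (fun output i =>
    let counter : Int :=
      if graph.contains i then
        -- neighbours = list(graph[i]); the loop only sums, so set order is immaterial
        (graph.getD i PySem.Set.empty).foldl
          (fun counter v => counter + PySem.Set.len (graph.getD v PySem.Set.empty)) 0
      else 0
    output ++ (PySem.Int.toStr counter ++ " ")) ""

-- ===== PORT B =====
def calculateGraphDoubleDegrees_alt (edgeList : List (List Int)) (n : Int) : String :=
  let graph := pvBuildGraph edgeList
  let deg : PySem.Dict Int Int :=
    graph.items.foldl (fun d p => d.insert p.1 (PySem.Set.len p.2)) PySem.Dict.empty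
  let ddeg : PySem.Dict Int Int :=
    graph.items.foldl (fun d p =>
      p.2.foldl (fun d v =>
        if p.1 < v then
          let d1 := d.insert p.1 (d.getD p.1 0 + deg.getD v 0)
          d1.insert v (d1.getD v 0 + deg.getD p.1 0)
        else if p.1 = v then d.insert p.1 (d.getD p.1 0 + deg.getD p.1 0)
        else d) d) PySem.Dict.empty
  ((PySem.List.pyRange 1 (n + 1) 1).map
    (fun i => PySem.Int.toStr (ddeg.getD i 0) ++ " ")).foldl (· ++ ·) ""

-- ===== PRECONDITION & SPEC =====
-- Pre_ excludes edges with fewer than two entries, on which A (and B) raise IndexError at e[0]/e[1].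
def Pre_calculateGraphDoubleDegrees (edgeList : List (List Int)) (n : Int) : Prop :=
  ∀ e ∈ edgeList, 2 ≤ e.length
instance (edgeList : List (List Int)) (n : Int) : Decidable (Pre_calculateGraphDoubleDegrees edgeList n) := by unfold Pre_calculateGraphDoubleDegrees; infer_instance

def pvWitness_calculateGraphDoubleDegrees : List (List Int) × Int := ([[1, 2], [2, 3], [3, 3]], 4)

def Spec_calculateGraphDoubleDegrees (edgeList : List (List Int)) (n : Int) (out : String) : Prop := out = calculateGraphDoubleDegrees_alt edgeList n
instance (edgeList : List (List Int)) (n : Int) (out : String) : Decidable (Spec_calculateGraphDoubleDegrees edgeList n out) := by unfold Spec_calculateGraphDoubleDegrees; infer_instance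

-- ===== CLAIM (what is proved, stated in full; the proofs are below) =====
def Claim_equal_calculateGraphDoubleDegrees : Prop := ∀ (edgeList : List (List Int)) (n : Int), Dom_calculateGraphDoubleDegrees edgeList n → Pre_calculateGraphDoubleDegrees edgeList n → Spec_calculateGraphDoubleDegrees edgeList n (calculateGraphDoubleDegrees edgeList n)

-- ===== LEMMAS AND PROOFS =====

-- the invariant of the adjacency dictionary: unique keys, deduped neighbour sets,
-- symmetry, and every neighbour is itself a key
def pvInv (g : PySem.Dict Int (PySem.Set Int)) : Prop :=
  g.keys.Nodup ∧
  (∀ u, (g.getD u PySem.Set.empty).Nodup) ∧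
  (∀ u v, v ∈ g.getD u PySem.Set.empty → u ∈ g.getD v PySem.Set.empty) ∧
  (∀ u v, v ∈ g.getD u PySem.Set.empty → g.contains v = true)

theorem pvCondIns_getD (g : PySem.Dict Int (PySem.Set Int)) (k x : Int) :
    (if g.contains k then g else g.insert k PySem.Set.empty).getD x PySem.Set.empty
      = g.getD x PySem.Set.empty := by
  cases hc : g.contains k
  · simp only [Bool.false_eq_true, if_false, PySem.Dict.getD_insert]
    split_ifs with h
    · subst h; exact (PySem.Dict.getD_of_not_contains g _ hc).symm
    · rfl
  · simp

theorem pvCondIns_nodup (g : PySem.Dict Int (PySem.Set Int)) (k : Int) (h : g.keys.Nodup) :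
    (if g.contains k then g else g.insert k PySem.Set.empty).keys.Nodup := by
  cases hc : g.contains k
  · simpa using PySem.Dict.nodup_keys_insert g k PySem.Set.empty h
  · simpa using h

theorem pvAdj_step (g : PySem.Dict Int (PySem.Set Int)) (a b : Int) (rest : List Int) (x : Int) :
    (pvAddEdge g (a :: b :: rest)).getD x PySem.Set.empty =
      if x = b then
        PySem.Set.add (if b = a then PySem.Set.add (g.getD a PySem.Set.empty) b
                       else g.getD b PySem.Set.empty) a
      else if x = a then PySem.Set.add (g.getD a PySem.Set.empty) b
      else g.getD x PySem.Set.empty := by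
  unfold pvAddEdge
  simp only [PySem.Dict.getD_modify, pvCondIns_getD]

theorem pvContains_step (g : PySem.Dict Int (PySem.Set Int)) (a b : Int) (rest : List Int) (x : Int) :
    ((pvAddEdge g (a :: b :: rest)).contains x = true) ↔ (x = a ∨ x = b ∨ g.contains x = true) := by
  unfold pvAddEdge
  dsimp only
  by_cases hca : g.contains a = true
  · simp only [hca, if_true]
    by_cases hcb : g.contains b = true
    · simp only [hcb, if_true, PySem.Dict.contains_modify, Bool.or_eq_true, beq_iff_eq]
      tauto
    · simp only [hcb, Bool.false_eq_true, if_false, PySem.Dict.contains_modify,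
        PySem.Dict.contains_insert, Bool.or_eq_true, beq_iff_eq]
      tauto
  · simp only [hca, Bool.false_eq_true, if_false]
    by_cases hcb : (g.insert a PySem.Set.empty).contains b = true
    · simp only [hcb, if_true, PySem.Dict.contains_modify, PySem.Dict.contains_insert,
        Bool.or_eq_true, beq_iff_eq]
      tauto
    · simp only [hcb, Bool.false_eq_true, if_false, PySem.Dict.contains_modify,
        PySem.Dict.contains_insert, Bool.or_eq_true, beq_iff_eq]
      tauto

theorem pvNodup_step (g : PySem.Dict Int (PySem.Set Int)) (a b : Int) (rest : List Int)
    (h : g.keys.Nodup) : (pvAddEdge g (a :: b :: rest)).keys.Nodup := by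
  unfold pvAddEdge
  dsimp only
  rw [PySem.Dict.keys_modify]
  apply PySem.Dict.nodup_keys_insert
  rw [PySem.Dict.keys_modify]
  apply PySem.Dict.nodup_keys_insert
  exact pvCondIns_nodup _ b (pvCondIns_nodup g a h)

theorem pvInv_step (g : PySem.Dict Int (PySem.Set Int)) (e : List Int) (h : pvInv g) :
    pvInv (pvAddEdge g e) := by
  match e with
  | [] => exact h
  | [a] => exact h
  | a :: b :: rest =>
    obtain ⟨h1, h2, h3, h4⟩ := h
    refine ⟨pvNodup_step g a b rest h1, ?_, ?_, ?_⟩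
    · intro u
      rw [pvAdj_step]
      split_ifs <;> (repeat' apply PySem.Set.nodup_add) <;> apply h2
    · intro u v hv
      rw [pvAdj_step] at hv
      rw [pvAdj_step]
      have t1 := h3 u v; have t2 := h3 v u; have t3 := h3 a v; have t4 := h3 v a
      have t5 := h3 b v; have t6 := h3 v b; have t7 := h3 a b; have t8 := h3 b a
      have t9 := h3 u a; have t10 := h3 u b; have t11 := h3 a u; have t12 := h3 b u
      by_cases hub : u = b <;> by_cases hua : u = a <;> by_cases hvb : v = b <;>
        by_cases hva : v = a <;> by_cases hba : b = a <;>
        (try simp_all [PySem.Set.mem_add])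
    · intro u v hv
      rw [pvAdj_step] at hv
      rw [pvContains_step]
      have k1 := h4 u v; have k2 := h4 a v; have k3 := h4 b v
      split_ifs at hv <;> (try simp only [PySem.Set.mem_add] at hv) <;> tauto

theorem pvInv_empty : pvInv (PySem.Dict.empty : PySem.Dict Int (PySem.Set Int)) := by
  refine ⟨?_, ?_, ?_, ?_⟩ <;> simp [PySem.Dict.keys_empty, PySem.Dict.getD_empty, PySem.Set.empty]

theorem pvInv_build (edgeList : List (List Int)) : pvInv (pvBuildGraph edgeList) := by
  suffices h : ∀ (l : List (List Int)) (d : PySem.Dict Int (PySem.Set Int)),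
      pvInv d → pvInv (l.foldl pvAddEdge d) by
    exact h edgeList PySem.Dict.empty pvInv_empty
  intro l
  induction l with
  | nil => exact fun d h => h
  | cons e l ih => exact fun d h => ih _ (pvInv_step d e h)

-- per-element contribution of the edge-centric pass to ddeg[i]
def pvContrib (f : Int → Int) (u v i : Int) : Int :=
  (if i = u ∧ u < v then f v else 0) + (if i = v ∧ u < v then f u else 0) +
    (if i = u ∧ u = v then f u else 0)

theorem pvBump (d : PySem.Dict Int Int) (k x i : Int) :
    (d.insert k (d.getD k 0 + x)).getD i 0 = d.getD i 0 + (if i = k then x else 0) := by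
  rw [PySem.Dict.getD_insert]
  split_ifs with h
  · subst h; ring
  · ring

theorem pvInnerFold (deg : PySem.Dict Int Int) (u i : Int) (s : List Int)
    (d : PySem.Dict Int Int) :
    (s.foldl (fun d v =>
        if u < v then
          let d1 := d.insert u (d.getD u 0 + deg.getD v 0)
          d1.insert v (d1.getD v 0 + deg.getD u 0)
        else if u = v then d.insert u (d.getD u 0 + deg.getD u 0)
        else d) d).getD i 0
      = d.getD i 0 + (s.map (fun v => pvContrib (fun w => deg.getD w 0) u v i)).sum := by
  induction s generalizing d with
  | nil => simp
  | cons v s ih =>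
    simp only [List.foldl_cons, List.map_cons, List.sum_cons]
    rw [ih]
    have hstep : (if u < v then
          let d1 := d.insert u (d.getD u 0 + deg.getD v 0)
          d1.insert v (d1.getD v 0 + deg.getD u 0)
        else if u = v then d.insert u (d.getD u 0 + deg.getD u 0)
        else d).getD i 0 = d.getD i 0 + pvContrib (fun w => deg.getD w 0) u v i := by
      rcases lt_trichotomy u v with h | h | h
      · rw [if_pos h]
        dsimp only
        rw [pvBump, pvBump]
        simp only [pvContrib, h, and_true, (h.ne : ¬ u = v), and_false, if_false]
        ring
      · subst h
        rw [if_neg (lt_irrefl u), if_pos rfl, pvBump]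
        simp only [pvContrib, lt_irrefl, and_false, if_false, and_true]
        ring
      · rw [if_neg (not_lt.mpr h.le), if_neg h.ne']
        simp [pvContrib, not_lt.mpr h.le, h.ne']
    rw [hstep]; ring

theorem pvOuterFold (deg : PySem.Dict Int Int) (i : Int) (L : List (Int × PySem.Set Int))
    (d : PySem.Dict Int Int) :
    (L.foldl (fun d p =>
        p.2.foldl (fun d v =>
          if p.1 < v then
            let d1 := d.insert p.1 (d.getD p.1 0 + deg.getD v 0)
            d1.insert v (d1.getD v 0 + deg.getD p.1 0)
          else if p.1 = v then d.insert p.1 (d.getD p.1 0 + deg.getD p.1 0)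
          else d) d) d).getD i 0
      = d.getD i 0 +
        (L.map (fun p => (p.2.map (fun v => pvContrib (fun w => deg.getD w 0) p.1 v i)).sum)).sum := by
  induction L generalizing d with
  | nil => simp
  | cons p L ih =>
    simp only [List.foldl_cons, List.map_cons, List.sum_cons]
    rw [ih, pvInnerFold]
    ring

theorem pvSumIteEq (K : List Int) (hK : K.Nodup) (i : Int) (h : Int → Int) :
    (K.map (fun u => if u = i then h u else 0)).sum = if i ∈ K then h i else 0 := by
  induction K with
  | nil => simp
  | cons k K ih =>
    rcases List.nodup_cons.mp hK with ⟨hk, hK'⟩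
    simp only [List.map_cons, List.sum_cons, List.mem_cons]
    by_cases hki : k = i
    · subst hki
      rw [if_pos rfl, ih hK', if_neg (fun h => hk h), if_pos (Or.inl rfl)]
      ring
    · rw [if_neg hki, ih hK']
      by_cases hiK : i ∈ K
      · rw [if_pos hiK, if_pos (Or.inr hiK)]; ring
      · rw [if_neg hiK, if_neg (by rintro (h | h); exact hki h.symm; exact hiK h)]; ring

theorem pvSumFilterMem (K S : List Int) (h : Int → Int) (hK : K.Nodup) (hS : S.Nodup)
    (hsub : ∀ x ∈ S, x ∈ K) :
    (K.map (fun u => if u ∈ S then h u else 0)).sum = (S.map h).sum := by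
  rw [← List.sum_toFinset _ hK, ← List.sum_toFinset _ hS]
  have : ∀ u, (if u ∈ S then h u else 0) = (if u ∈ S.toFinset then h u else 0) := by
    intro u; simp
  simp only [this]
  rw [Finset.sum_ite_mem]
  congr 1
  rw [Finset.inter_eq_right]
  intro x hx
  simp only [List.mem_toFinset] at hx ⊢
  exact hsub x hx

-- the double counting: the edge-centric pass accumulates exactly A's per-vertex sum
theorem pvCounting (g : PySem.Dict Int (PySem.Set Int)) (hinv : pvInv g) (f : Int → Int) (i : Int) :
    (g.items.map (fun p => (p.2.map (fun v => pvContrib f p.1 v i)).sum)).sum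
      = ((g.getD i PySem.Set.empty).map f).sum := by
  obtain ⟨h1, h2, h3, h4⟩ := hinv
  have hmemK : ∀ u v : Int, v ∈ g.getD u PySem.Set.empty → v ∈ g.keys := by
    intro u v hv
    exact (PySem.Dict.contains_iff_mem_keys g v).mp (h4 u v hv)
  have hadj_nil : i ∉ g.keys → g.getD i PySem.Set.empty = PySem.Set.empty := by
    intro hi
    refine PySem.Dict.getD_of_not_contains g _ ?_
    cases hc : g.contains i
    · rfl
    · exact absurd ((PySem.Dict.contains_iff_mem_keys g i).mp hc) hi
  rw [PySem.Dict.items_eq_map_keys g h1 PySem.Set.empty, List.map_map]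
  have hsplit : (g.keys.map ((fun p : Int × PySem.Set Int => (p.2.map (fun v => pvContrib f p.1 v i)).sum) ∘ (fun k => (k, g.getD k PySem.Set.empty)))).sum
      = (g.keys.map (fun k => ((g.getD k PySem.Set.empty).map (fun v => if i = k ∧ k < v then f v else 0)).sum)).sum
      + (g.keys.map (fun k => ((g.getD k PySem.Set.empty).map (fun v => if i = v ∧ k < v then f k else 0)).sum)).sum
      + (g.keys.map (fun k => ((g.getD k PySem.Set.empty).map (fun v => if i = k ∧ k = v then f k else 0)).sum)).sum := by
    rw [← PySem.List.sum_map_add_int, ← PySem.List.sum_map_add_int]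
    refine congrArg List.sum (List.map_eq_map_iff.mpr ?_)
    intro k _
    simp only [Function.comp_apply, pvContrib]
    rw [← PySem.List.sum_map_add_int, ← PySem.List.sum_map_add_int]
  rw [hsplit]
  have hS1 : (g.keys.map (fun k => ((g.getD k PySem.Set.empty).map (fun v => if i = k ∧ k < v then f v else 0)).sum)).sum
      = ((g.getD i PySem.Set.empty).map (fun v => if i < v then f v else 0)).sum := by
    have e1 : ∀ k, ((g.getD k PySem.Set.empty).map (fun v => if i = k ∧ k < v then f v else 0)).sum
        = if k = i then ((g.getD i PySem.Set.empty).map (fun v => if i < v then f v else 0)).sum else 0 := by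
      intro k
      by_cases hk : k = i
      · subst hk; simp
      · rw [if_neg hk]
        refine List.sum_eq_zero ?_
        intro x hx
        rcases List.mem_map.mp hx with ⟨v, _, rfl⟩
        rw [if_neg (fun hc => hk hc.1.symm)]
    simp only [e1]
    rw [pvSumIteEq g.keys h1 i _]
    by_cases hi : i ∈ g.keys
    · rw [if_pos hi]
    · rw [if_neg hi, hadj_nil hi]; rfl
  have hS3 : (g.keys.map (fun k => ((g.getD k PySem.Set.empty).map (fun v => if i = k ∧ k = v then f k else 0)).sum)).sum
      = ((g.getD i PySem.Set.empty).map (fun v => if v = i then f v else 0)).sum := by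
    have e3 : ∀ k, ((g.getD k PySem.Set.empty).map (fun v => if i = k ∧ k = v then f k else 0)).sum
        = if k = i then ((g.getD i PySem.Set.empty).map (fun v => if v = i then f v else 0)).sum else 0 := by
      intro k
      by_cases hk : k = i
      · subst hk
        rw [if_pos rfl]
        refine congrArg List.sum (List.map_eq_map_iff.mpr ?_)
        intro v _
        by_cases hv : v = k
        · subst hv; simp
        · rw [if_neg (fun hc => hv hc.2.symm), if_neg hv]
      · rw [if_neg hk]
        refine List.sum_eq_zero ?_
        intro x hx
        rcases List.mem_map.mp hx with ⟨v, _, rfl⟩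
        rw [if_neg (fun hc => hk hc.1.symm)]
    simp only [e3]
    rw [pvSumIteEq g.keys h1 i _]
    by_cases hi : i ∈ g.keys
    · rw [if_pos hi]
    · rw [if_neg hi, hadj_nil hi]; rfl
  have hS2 : (g.keys.map (fun k => ((g.getD k PySem.Set.empty).map (fun v => if i = v ∧ k < v then f k else 0)).sum)).sum
      = ((g.getD i PySem.Set.empty).map (fun v => if v < i then f v else 0)).sum := by
    have e2 : ∀ k, ((g.getD k PySem.Set.empty).map (fun v => if i = v ∧ k < v then f k else 0)).sum
        = if k ∈ g.getD i PySem.Set.empty then (if k < i then f k else 0) else 0 := by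
      intro k
      have he : ((g.getD k PySem.Set.empty).map (fun v => if i = v ∧ k < v then f k else 0)).sum
          = ((g.getD k PySem.Set.empty).map (fun v => if v = i then (if k < i then f k else 0) else 0)).sum := by
        refine congrArg List.sum (List.map_eq_map_iff.mpr ?_)
        intro v _
        by_cases hv : v = i
        · subst hv; simp
        · rw [if_neg (fun hc => hv hc.1.symm), if_neg hv]
      rw [he, pvSumIteEq _ (h2 k) i _]
      by_cases hik : i ∈ g.getD k PySem.Set.empty
      · rw [if_pos hik, if_pos (h3 k i hik)]
      · rw [if_neg hik]
        by_cases hki : k ∈ g.getD i PySem.Set.empty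
        · exact absurd (h3 i k hki) hik
        · rw [if_neg hki]
    simp only [e2]
    rw [pvSumFilterMem g.keys (g.getD i PySem.Set.empty) _ h1 (h2 i) (hmemK i)]
  rw [hS1, hS2, hS3, ← PySem.List.sum_map_add_int, ← PySem.List.sum_map_add_int]
  refine congrArg List.sum (List.map_eq_map_iff.mpr ?_)
  intro v _
  rcases lt_trichotomy i v with h | h | h
  · rw [if_pos h, if_neg (not_lt.mpr h.le), if_neg (fun hc : v = i => h.ne' hc)]; ring
  · rw [if_neg (h ▸ lt_irrefl i), if_neg (h ▸ lt_irrefl i), if_pos h.symm]; ring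
  · rw [if_neg (not_lt.mpr h.le), if_pos h, if_neg (fun hc : v = i => h.ne hc)]; ring

-- the degree table returns len(graph[v]) everywhere (0 = len ∅ off the keys)
theorem pvDegTable (g : PySem.Dict Int (PySem.Set Int)) (hnd : g.keys.Nodup) (v : Int) :
    (g.items.foldl (fun d p => d.insert p.1 (PySem.Set.len p.2)) PySem.Dict.empty).getD v 0
      = PySem.Set.len (g.getD v PySem.Set.empty) := by
  have hkeys : g.items.map Prod.fst = g.keys := rfl
  have hfresh := PySem.Dict.items_foldl_insert_fresh (ν := Int) g.items Prod.fst
      (fun p => PySem.Set.len p.2) PySem.Dict.empty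
      (by intro a _; simp [PySem.Dict.contains_empty]) (by rw [hkeys]; exact hnd)
  set D := g.items.foldl (fun d p => d.insert p.1 (PySem.Set.len p.2)) PySem.Dict.empty with hD
  have hDitems : D.items = g.items.map (fun p => (p.1, PySem.Set.len p.2)) := by
    simpa using hfresh
  have hDkeys : D.keys = g.keys := by
    show D.items.map Prod.fst = g.keys
    rw [hDitems, List.map_map, ← hkeys]; rfl
  by_cases hc : g.contains v
  · have hv : v ∈ g.keys := (PySem.Dict.contains_iff_mem_keys g v).mp hc
    have hmem : (v, g.getD v PySem.Set.empty) ∈ g.items := by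
      rw [PySem.Dict.items_eq_map_keys g hnd PySem.Set.empty]
      exact List.mem_map.mpr ⟨v, hv, rfl⟩
    have hmemD : (v, PySem.Set.len (g.getD v PySem.Set.empty)) ∈ D.items := by
      rw [hDitems]; exact List.mem_map.mpr ⟨_, hmem, rfl⟩
    exact PySem.Dict.getD_of_mem_items D hmemD (hDkeys ▸ hnd) 0
  · have h1 : g.getD v PySem.Set.empty = PySem.Set.empty :=
      PySem.Dict.getD_of_not_contains g _ (by revert hc; cases hcv : g.contains v <;> simp)
    have h2 : D.contains v = false := by
      cases hDc : D.contains v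
      · rfl
      · exact absurd ((PySem.Dict.contains_iff_mem_keys g v).mpr
          (hDkeys ▸ (PySem.Dict.contains_iff_mem_keys D v).mp hDc)) hc
    rw [PySem.Dict.getD_of_not_contains D _ h2, h1]
    rfl

-- B's double-degree dictionary holds exactly A's per-vertex counter, for every index
theorem pvDDeg (G : PySem.Dict Int (PySem.Set Int)) (hinv : pvInv G)
    (deg : PySem.Dict Int Int) (hdeg : ∀ w, deg.getD w 0 = PySem.Set.len (G.getD w PySem.Set.empty))
    (i : Int) :
    (G.items.foldl (fun d p =>
        p.2.foldl (fun d v =>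
          if p.1 < v then
            let d1 := d.insert p.1 (d.getD p.1 0 + deg.getD v 0)
            d1.insert v (d1.getD v 0 + deg.getD p.1 0)
          else if p.1 = v then d.insert p.1 (d.getD p.1 0 + deg.getD p.1 0)
          else d) d) PySem.Dict.empty).getD i 0
      = (if G.contains i then
          (G.getD i PySem.Set.empty).foldl
            (fun counter v => counter + PySem.Set.len (G.getD v PySem.Set.empty)) 0
         else 0) := by
  rw [pvOuterFold, pvCounting G hinv _ i]
  have hmap : (G.getD i PySem.Set.empty).map (fun w => deg.getD w 0)
      = (G.getD i PySem.Set.empty).map (fun v => PySem.Set.len (G.getD v PySem.Set.empty)) :=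
    List.map_eq_map_iff.mpr (fun v _ => hdeg v)
  rw [hmap, PySem.List.foldl_add]
  cases hc : G.contains i
  · rw [PySem.Dict.getD_of_not_contains G _ hc]
    simp [PySem.Dict.getD_empty, PySem.Set.empty]
  · simp [PySem.Dict.getD_empty]

-- ===== VERDICT (by name: the statement is the Claim_ definition above) =====
theorem calculateGraphDoubleDegrees_spec : Claim_equal_calculateGraphDoubleDegrees := by
  intro edgeList n _ _
  unfold Spec_calculateGraphDoubleDegrees
  unfold calculateGraphDoubleDegrees calculateGraphDoubleDegrees_alt
  dsimp only
  rw [List.foldl_map]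
  have hinv := pvInv_build edgeList
  congr 1
  funext acc i
  rw [pvDDeg (pvBuildGraph edgeList) hinv _
    (pvDegTable (pvBuildGraph edgeList) hinv.1) i]
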